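-- pv_equiv track=rewrite | github.com/ji-eun-moon/Algorithm | 기출/메시지 복호화하기.py | solution
-- ===== SOURCE A (Python) =====
-- def solution(m, k):
--     answer = ''
--     message, key = 0, 0
--
--     while message < len(m):
--
--         # 암호 문자열 전부 확인했으면 나머지 문자열 정답 문자열에 합치고 반복문 종료
--         if key >= len(k):
--             answer += m[message:]
--             break
--
--         # 암호 문자열에 포함되어 있는 문자열이면 다음 문자열로 넘어감
--         if m[message] == k[key]:
--             message += 1
--             key += 1
--         # 포함되지 않는 문자열이면 정답 문자열에 추가
--         else:
--             answer += m[message]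
--             message += 1
--
--     return answer
-- ===== SOURCE B (Python) =====
-- def solution(m, k):
--     # pass 1: greedy subsequence match; record which positions of m are consumed by k
--     consumed = set()
--     key = 0
--     for i, ch in enumerate(m):
--         if key < len(k) and ch == k[key]:
--             consumed.add(i)
--             key += 1
--     # pass 2: rebuild the message from the unconsumed positions
--     return ''.join(ch for i, ch in enumerate(m) if i not in consumed)
-- ===== Notes on version B (the rewrite author's own statement) =====
-- stated objective: faster
-- what changed: Replaces A's single interleaved scan-and-build while-loop (repeated string concatenation) with two passes: one pass collecting the greedily matched indices into a set, then a single join over enumerate(m) keeping unconsumed positions.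
import Mathlib
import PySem

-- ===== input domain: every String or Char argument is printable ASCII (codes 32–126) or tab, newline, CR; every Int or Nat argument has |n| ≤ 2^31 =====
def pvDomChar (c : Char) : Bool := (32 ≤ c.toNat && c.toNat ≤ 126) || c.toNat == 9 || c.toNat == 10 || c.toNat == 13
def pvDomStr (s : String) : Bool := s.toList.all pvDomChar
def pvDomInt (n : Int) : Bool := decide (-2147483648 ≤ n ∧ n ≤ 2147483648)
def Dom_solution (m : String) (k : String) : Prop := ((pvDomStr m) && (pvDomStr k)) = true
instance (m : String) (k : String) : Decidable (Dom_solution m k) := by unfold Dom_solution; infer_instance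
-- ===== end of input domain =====

-- B (two-pass: collect greedily matched indices into a set, then rebuild) equals A's
-- interleaved scan-and-build loop; equivalence of the RETURN value, proved for all inputs.

-- ===== PORT A =====
-- A's while-loop over indices message/key (Python ints, nonnegative throughout).
def aLoop (ml kl : List Char) (answer : List Char) (message key : Nat) : List Char :=
  if message < ml.length then
    if kl.length ≤ key then
      answer ++ ml.drop message          -- answer += m[message:] (nonneg slice = drop), break
    else if ml[message]! = kl[key]! then
      aLoop ml kl answer (message + 1) (key + 1)
    else
      aLoop ml kl (answer ++ [ml[message]!]) (message + 1) key
  else answer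
termination_by ml.length - message
decreasing_by all_goals omega

def solution (m : String) (k : String) : String :=
  String.ofList (aLoop m.toList k.toList [] 0 0)

-- ===== PORT B =====
-- pass 1: fold over enumerate(m); guard 'key < len(k) and ch == k[key]'
def bStep (kl : List Char) (st : PySem.Set Int × Int) (p : Int × Char) : PySem.Set Int × Int :=
  if st.2 < (kl.length : Int) ∧ p.2 = PySem.List.pyGetD kl st.2 ' ' then
    (PySem.Set.add st.1 p.1, st.2 + 1)
  else st

def solution_alt (m : String) (k : String) : String :=
  let consumed := ((PySem.List.enumerate m.toList 0).foldl (bStep k.toList)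
                    (PySem.Set.empty, 0)).1
  -- pass 2: ''.join of the single chars at unconsumed positions = their concatenation
  String.ofList (((PySem.List.enumerate m.toList 0).filter
      (fun p => !(PySem.Set.contains consumed p.1))).map (·.2))

-- ===== PRECONDITION & SPEC =====
def Spec_solution (m : String) (k : String) (out : String) : Prop := out = solution_alt m k
instance (m : String) (k : String) (out : String) : Decidable (Spec_solution m k out) := by unfold Spec_solution; infer_instance

-- ===== CLAIM (what is proved, stated in full; the proofs are below) =====
def Claim_equal_solution : Prop := ∀ (m : String) (k : String), Dom_solution m k → Spec_solution m k (solution m k)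

-- ===== LEMMAS AND PROOFS =====

-- common characterization: greedy subsequence removal
def g : List Char → List Char → List Char
  | [], _ => []
  | c :: ms, [] => c :: ms
  | c :: ms, x :: ks => if c = x then g ms ks else c :: g ms (x :: ks)

lemma g_nil_right (ms : List Char) : g ms [] = ms := by cases ms <;> rfl

-- A's loop computes g on the remaining suffixes
lemma aLoop_eq (ml kl : List Char) : ∀ n message key (acc : List Char),
    ml.length - message ≤ n → key ≤ kl.length →
    aLoop ml kl acc message key = acc ++ g (ml.drop message) (kl.drop key) := by
  intro n
  induction n with
  | zero =>
    intro message key acc hn hk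
    have hml : ml.length ≤ message := by omega
    rw [aLoop, if_neg (by omega), List.drop_eq_nil_of_le hml]
    cases kl.drop key <;> simp [g]
  | succ n ih =>
    intro message key acc hn hk
    by_cases h : message < ml.length
    · have hdm : ml.drop message = ml[message] :: ml.drop (message + 1) :=
        List.drop_eq_getElem_cons h
      have hmb : ml[message]! = ml[message] := getElem!_pos ml message h
      by_cases hkl : kl.length ≤ key
      · have hdk : kl.drop key = [] := List.drop_eq_nil_of_le hkl
        rw [aLoop, if_pos h, if_pos hkl, hdk, g_nil_right]
      · have hkk : key < kl.length := by omega
        have hdk : kl.drop key = kl[key] :: kl.drop (key + 1) :=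
          List.drop_eq_getElem_cons hkk
        have hbang : kl[key]! = kl[key] := getElem!_pos kl key hkk
        by_cases heq : ml[message] = kl[key]
        · rw [aLoop, if_pos h, if_neg hkl, if_pos (by rw [hmb, hbang]; exact heq)]
          rw [ih (message+1) (key+1) acc (by omega) (by omega), hdm, hdk, g, if_pos heq]
        · rw [aLoop, if_pos h, if_neg hkl, if_neg (by rw [hmb, hbang]; exact heq)]
          rw [ih (message+1) key (acc ++ [ml[message]!]) (by omega) hk, hdm, hdk, g,
            if_neg heq, hmb]
          simp
    · have hdm : ml.drop message = [] := List.drop_eq_nil_of_le (by omega)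
      rw [aLoop, if_neg h, hdm]
      cases kl.drop key <;> simp [g]

-- absolute indices of the positions of m consumed by the greedy match, starting at offset i
def matchIdx : List Char → List Char → Int → List Int
  | [], _, _ => []
  | _ :: _, [], _ => []
  | c :: ms, x :: ks, i => if c = x then i :: matchIdx ms ks (i + 1) else matchIdx ms (x :: ks) (i + 1)

lemma matchIdx_nil_right : ∀ (ms : List Char) (i : Int), matchIdx ms [] i = [] := by
  intro ms i; cases ms <;> rfl

lemma matchIdx_ge : ∀ (ms ks : List Char) (i : Int), ∀ j ∈ matchIdx ms ks i, i ≤ j := by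
  intro ms
  induction ms with
  | nil => intro ks i j hj; simp [matchIdx] at hj
  | cons c ms ih =>
    intro ks i j hj
    cases ks with
    | nil => simp [matchIdx] at hj
    | cons x ks =>
      by_cases h : c = x
      · rw [matchIdx, if_pos h] at hj
        rcases List.mem_cons.1 hj with h1 | h1
        · omega
        · have := ih ks (i+1) j h1; omega
      · rw [matchIdx, if_neg h] at hj
        have := ih (x :: ks) (i+1) j hj; omega

-- pass 1 of B computes matchIdx
lemma bFold_eq (kl : List Char) : ∀ (ml : List Char) (i : Int) (s : List Int) (key : Int),
    0 ≤ key → key ≤ kl.length → (∀ x ∈ s, x < i) →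
    ((PySem.List.enumerate ml i).foldl (bStep kl) (s, key)).1
      = s ++ matchIdx ml (kl.drop key.toNat) i := by
  intro ml
  induction ml with
  | nil => intro i s key h0 hk hs; simp [PySem.List.enumerate_nil, matchIdx]
  | cons c ms ih =>
    intro i s key h0 hk hs
    rw [PySem.List.enumerate_cons, List.foldl_cons]
    by_cases hg : key < (kl.length : Int) ∧ c = PySem.List.pyGetD kl key ' '
    · have hkey : key.toNat < kl.length := by omega
      have hget : PySem.List.pyGetD kl key ' ' = kl[key.toNat] :=
        PySem.List.pyGetD_eq_getElem kl ' ' h0 (by omega)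
      have hdk : kl.drop key.toNat = kl[key.toNat] :: kl.drop (key.toNat + 1) :=
        List.drop_eq_getElem_cons hkey
      have hadd : PySem.Set.add s i = s ++ [i] := by
        rw [PySem.Set.add, if_neg (by
          simpa using fun hmem => absurd (hs i hmem) (by omega))]
      rw [show bStep kl (s, key) (i, c) = (PySem.Set.add s i, key + 1) by
        simp [bStep, hg]]
      rw [ih (i+1) (PySem.Set.add s i) (key+1) (by omega) (by omega)
        (by intro x hx; rw [hadd] at hx
            rcases List.mem_append.1 hx with h1 | h1
            · have := hs x h1; omega
            · simp at h1; omega)]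
      rw [hadd, hdk, matchIdx, if_pos (by rw [hg.2, hget]),
        show (key + 1).toNat = key.toNat + 1 by omega]
      simp
    · rw [show bStep kl (s, key) (i, c) = (s, key) by simp [bStep, hg]]
      rw [ih (i+1) s key h0 hk (by intro x hx; have := hs x hx; omega)]
      rcases Nat.lt_or_ge key.toNat kl.length with hlt | hge
      · -- guard failed because of the char comparison
        have hkl : key < (kl.length : Int) := by omega
        have hne : c ≠ PySem.List.pyGetD kl key ' ' := fun hc => hg ⟨hkl, hc⟩
        have hget : PySem.List.pyGetD kl key ' ' = kl[key.toNat] :=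
          PySem.List.pyGetD_eq_getElem kl ' ' h0 (by omega)
        have hdk : kl.drop key.toNat = kl[key.toNat] :: kl.drop (key.toNat + 1) :=
          List.drop_eq_getElem_cons hlt
        rw [hdk, matchIdx, if_neg (by rw [← hget]; exact hne), ← hdk]
      · have hnil : kl.drop key.toNat = [] := List.drop_eq_nil_of_le hge
        rw [hnil, matchIdx_nil_right, matchIdx_nil_right]

-- pass 2 of B: filtering enumerate by any set that agrees with matchIdx on indices ≥ i gives g
lemma bFilter_eq : ∀ (ml kl : List Char) (i : Int) (T : List Int),
    (∀ j : Int, i ≤ j → (j ∈ T ↔ j ∈ matchIdx ml kl i)) →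
    ((PySem.List.enumerate ml i).filter (fun p => !(PySem.Set.contains T p.1))).map (·.2)
      = g ml kl := by
  intro ml
  induction ml with
  | nil => intro kl i T hT; simp [PySem.List.enumerate_nil, g]
  | cons c ms ih =>
    intro kl i T hT
    rw [PySem.List.enumerate_cons, List.filter_cons]
    cases kl with
    | nil =>
      have hi : i ∉ T := by
        intro hmem
        have := (hT i le_rfl).1 hmem
        rw [matchIdx_nil_right] at this
        exact absurd this (List.not_mem_nil)
      rw [if_pos (by simp [PySem.Set.contains, hi])]
      rw [List.map_cons, g_nil_right]
      have := ih [] (i+1) T (by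
        intro j hj
        rw [hT j (by omega), matchIdx_nil_right, matchIdx_nil_right])
      rw [this, g_nil_right]
    | cons x ks =>
      by_cases hc : c = x
      · have hmem : i ∈ T := (hT i le_rfl).2 (by rw [matchIdx, if_pos hc]; simp)
        rw [if_neg (by simp [PySem.Set.contains, hmem])]
        rw [ih ks (i+1) T (by
          intro j hj
          rw [hT j (by omega), matchIdx, if_pos hc, List.mem_cons]
          constructor
          · rintro (h1 | h1)
            · exfalso; omega
            · exact h1
          · exact Or.inr)]
        rw [g, if_pos hc]
      · have hi : i ∉ T := by
          intro hmem
          have := (hT i le_rfl).1 hmem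
          rw [matchIdx, if_neg hc] at this
          have := matchIdx_ge ms (x :: ks) (i+1) i this
          omega
        rw [if_pos (by simp [PySem.Set.contains, hi])]
        rw [List.map_cons, ih (x :: ks) (i+1) T (by
          intro j hj
          rw [hT j (by omega), matchIdx, if_neg hc])]
        rw [g, if_neg hc]

-- ===== VERDICT (by name: the statement is the Claim_ definition above) =====
theorem solution_spec : Claim_equal_solution := by
  intro m k _
  unfold Spec_solution solution solution_alt
  rw [aLoop_eq m.toList k.toList m.toList.length 0 0 [] (by omega) (by omega)]
  rw [bFold_eq k.toList m.toList 0 PySem.Set.empty 0 le_rfl (by omega)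
    (by intro x hx; simp [PySem.Set.empty] at hx)]
  simp only [PySem.Set.empty, List.nil_append, Int.toNat_zero, List.drop_zero]
  rw [bFilter_eq m.toList k.toList 0 (matchIdx m.toList k.toList 0)
    (fun j _ => Iff.rfl)]
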